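-- pv_equiv track=rewrite | github.com/danilopcarlotti/scdf | relatorio_tce_transparencia.py | consertar_str_cnpj
-- ===== SOURCE A (Python) =====
-- def consertar_str_cnpj(cnpj):
--     cnpj = cnpj.replace('/','').replace('-','').replace('.','')
--     if len(cnpj) == 14:
--         return cnpj
--     elif len(cnpj) > 14:
--         return consertar_str_cnpj(cnpj[:-1])
--     else:
--         return consertar_str_cnpj('0'+cnpj)
-- ===== SOURCE B (Python) =====
-- def consertar_str_cnpj(cnpj):
--     cnpj = cnpj.replace('/','').replace('-','').replace('.','')
--     if len(cnpj) >= 14: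
--         return cnpj[:14]
--     return '0' * (14 - len(cnpj)) + cnpj
-- ===== Notes on version B (the rewrite author's own statement) =====
-- stated objective: faster
-- what changed: Replaces A's character-by-character tail recursion (one self-call per missing or extra character, re-running the three replaces each time) with a closed form: strip the punctuation once, then truncate with a single slice or left-pad with a single zero-repetition to length 14.
import Mathlib
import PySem

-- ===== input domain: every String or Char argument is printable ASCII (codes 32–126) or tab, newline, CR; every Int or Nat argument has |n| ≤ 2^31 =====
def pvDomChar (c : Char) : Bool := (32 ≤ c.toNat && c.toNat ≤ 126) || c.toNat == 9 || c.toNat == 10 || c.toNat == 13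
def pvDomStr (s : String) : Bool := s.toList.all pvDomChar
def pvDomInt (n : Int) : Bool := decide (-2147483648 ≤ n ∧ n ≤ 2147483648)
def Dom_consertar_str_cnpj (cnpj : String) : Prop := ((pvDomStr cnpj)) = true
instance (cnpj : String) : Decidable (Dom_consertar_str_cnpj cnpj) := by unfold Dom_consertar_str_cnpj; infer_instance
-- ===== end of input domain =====

set_option maxHeartbeats 1600000


-- B replaces A's one-self-call-per-character tail recursion with a closed form: strip the
-- punctuation once, then a single slice (truncate) or a single left-pad with zeros; objective: faster.

def pvStrip (s : String) : String :=
  PySem.Str.replace (PySem.Str.replace (PySem.Str.replace s "/" "") "-" "") "." ""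
def pvKeep (a : Char) : Bool := (!(a == '.')) && ((!(a == '-')) && (!(a == '/')))
theorem pvReplace_go_single (c : Char) : ∀ (fuel : Nat) (l acc : List Char), l.length ≤ fuel →
    PySem.Chars.replace.go [c] [] fuel l acc = acc.reverse ++ l.filter (fun x => !(x == c)) := by
  intro fuel
  induction fuel with
  | zero =>
    intro l acc h
    have : l = [] := by cases l <;> simp_all
    subst this
    simp [PySem.Chars.replace.go]
  | succ n ih =>
    intro l acc h
    cases l with
    | nil => simp [PySem.Chars.replace.go]
    | cons hd tl =>
      rw [PySem.Chars.replace.go]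
      by_cases hc : c = hd
      · subst hc
        simp only [List.isPrefixOf, BEq.rfl, Bool.true_and, if_true, List.reverse_nil,
          List.nil_append]
        have hdrop : List.drop [c].length (c :: tl) = tl := by simp
        rw [hdrop]
        rw [ih tl acc (by simpa using h)]
        simp
      · have hb : ([c].isPrefixOf (hd :: tl)) = false := by
          simp [List.isPrefixOf]
          exact fun habs => hc (by simpa using habs)
        simp only [hb, Bool.false_eq_true, if_false]
        rw [ih tl (hd :: acc) (by simpa using Nat.le_of_succ_le_succ h)]
        have : (hd == c) = false := by simp [Ne.symm hc]
        simp [this]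
theorem pvReplace_single (cs : List Char) (c : Char) :
    PySem.Chars.replace cs [c] [] = cs.filter (fun x => !(x == c)) := by
  rw [PySem.Chars.replace]
  simp only [List.isEmpty_cons, if_false, Bool.false_eq_true]
  exact pvReplace_go_single c cs.length cs [] le_rfl
theorem toList_pvStrip (s : String) : (pvStrip s).toList = s.toList.filter pvKeep := by
  have h1 : ("/" : String).toList = ['/'] := rfl
  have h2 : ("-" : String).toList = ['-'] := rfl
  have h3 : ("." : String).toList = ['.'] := rfl
  have h4 : ("" : String).toList = [] := rfl
  simp only [pvStrip, PySem.Str.toList_replace, h1, h2, h3, h4, pvReplace_single,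
    List.filter_filter]
  rfl
theorem pvStrip_keep (s : String) : ∀ a ∈ (pvStrip s).toList, pvKeep a = true := by
  intro a ha
  rw [toList_pvStrip] at ha
  exact (List.mem_filter.mp ha).2
theorem pvStrip_slice (s : String) :
    (pvStrip (PySem.Str.slice (pvStrip s) none (some (-1)))).toList
      = (pvStrip s).toList.dropLast := by
  rw [toList_pvStrip, PySem.Str.slice_to_neg_one]
  exact List.filter_eq_self.mpr fun a ha =>
    pvStrip_keep s a ((List.dropLast_sublist _).subset ha)
theorem pvStrip_cons_zero (s : String) :
    (pvStrip (String.ofList ('0' :: (pvStrip s).toList))).toList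
      = '0' :: (pvStrip s).toList := by
  rw [toList_pvStrip, String.toList_ofList]
  exact List.filter_eq_self.mpr fun a ha => by
    rcases List.mem_cons.mp ha with h | h
    · subst h; rfl
    · exact pvStrip_keep s a h

-- ===== PORT A =====
def consertar_str_cnpj (cnpj : String) : String :=
  if (pvStrip cnpj).toList.length = 14 then pvStrip cnpj
  else if 14 < (pvStrip cnpj).toList.length then
    consertar_str_cnpj (PySem.Str.slice (pvStrip cnpj) none (some (-1)))      -- cnpj[:-1]
  else
    consertar_str_cnpj (String.ofList ('0' :: (pvStrip cnpj).toList))         -- '0' + cnpj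
termination_by (((pvStrip cnpj).toList.length : Int) - 14).natAbs
decreasing_by
  · rw [pvStrip_slice cnpj]
    simp only [List.length_dropLast]
    omega
  · rw [pvStrip_cons_zero cnpj]
    simp only [List.length_cons]
    omega

-- ===== PORT B =====
def consertar_str_cnpj_alt (cnpj : String) : String :=
  if 14 ≤ PySem.Str.len (pvStrip cnpj) then PySem.Str.slice (pvStrip cnpj) none (some 14)  -- cnpj[:14]
  else String.ofList (List.replicate (14 - (pvStrip cnpj).toList.length) '0' ++ (pvStrip cnpj).toList)  -- '0'*(14-len) + cnpj


-- ===== PRECONDITION & SPEC =====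
def Spec_consertar_str_cnpj (cnpj : String) (out : String) : Prop := out = consertar_str_cnpj_alt cnpj
instance (cnpj : String) (out : String) : Decidable (Spec_consertar_str_cnpj cnpj out) := by unfold Spec_consertar_str_cnpj; infer_instance

-- ===== CLAIM (what is proved, stated in full; the proofs are below) =====
def Claim_equal_consertar_str_cnpj : Prop := ∀ (cnpj : String), Dom_consertar_str_cnpj cnpj → Spec_consertar_str_cnpj cnpj (consertar_str_cnpj cnpj)

-- ===== LEMMAS AND PROOFS =====
theorem A_unfold (cnpj : String) : consertar_str_cnpj cnpj =
    if (pvStrip cnpj).toList.length = 14 then pvStrip cnpj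
    else if 14 < (pvStrip cnpj).toList.length then
      consertar_str_cnpj (PySem.Str.slice (pvStrip cnpj) none (some (-1)))
    else
      consertar_str_cnpj (String.ofList ('0' :: (pvStrip cnpj).toList)) := by
  rw [consertar_str_cnpj]
theorem A_toList_aux : ∀ (k : Nat) (cnpj : String),
    (((pvStrip cnpj).toList.length : Int) - 14).natAbs = k →
    (consertar_str_cnpj cnpj).toList =
      List.replicate (14 - (pvStrip cnpj).toList.length) '0'
        ++ (pvStrip cnpj).toList.take 14 := by
  intro k
  induction k using Nat.strong_induction_on with
  | _ k ih =>
    intro cnpj hk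
    by_cases h : (pvStrip cnpj).toList.length = 14
    · rw [A_unfold, if_pos h, List.take_of_length_le (le_of_eq h), h, Nat.sub_self,
        List.replicate_zero, List.nil_append]
    · by_cases h2 : 14 < (pvStrip cnpj).toList.length
      · rw [A_unfold, if_neg h, if_pos h2]
        rw [ih ((((pvStrip (PySem.Str.slice (pvStrip cnpj) none (some (-1)))).toList.length : Int) - 14).natAbs)
            (by rw [pvStrip_slice cnpj, List.length_dropLast]; omega)
            (PySem.Str.slice (pvStrip cnpj) none (some (-1))) rfl,
          pvStrip_slice cnpj]
        have htk : (pvStrip cnpj).toList.dropLast.take 14 = (pvStrip cnpj).toList.take 14 := by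
          rw [List.dropLast_eq_take, List.take_take, Nat.min_eq_left (by omega)]
        have hrep : 14 - (pvStrip cnpj).toList.dropLast.length = 14 - (pvStrip cnpj).toList.length := by
          rw [List.length_dropLast]; omega
        rw [htk, hrep]
      · rw [A_unfold, if_neg h, if_neg h2]
        rw [ih ((((pvStrip (String.ofList ('0' :: (pvStrip cnpj).toList))).toList.length : Int) - 14).natAbs)
            (by rw [pvStrip_cons_zero cnpj, List.length_cons]; omega)
            (String.ofList ('0' :: (pvStrip cnpj).toList)) rfl,
          pvStrip_cons_zero cnpj]
        have hn : (pvStrip cnpj).toList.length < 14 := by omega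
        rw [List.length_cons, List.take_succ_cons,
          List.take_of_length_le (l := (pvStrip cnpj).toList) (by omega),
          List.take_of_length_le (l := (pvStrip cnpj).toList) (by omega)]
        have h14 : 14 - (pvStrip cnpj).toList.length = (13 - (pvStrip cnpj).toList.length) + 1 := by omega
        rw [h14, List.replicate_succ']
        simp

theorem A_toList (cnpj : String) : (consertar_str_cnpj cnpj).toList =
    List.replicate (14 - (pvStrip cnpj).toList.length) '0'
      ++ (pvStrip cnpj).toList.take 14 :=
  A_toList_aux _ cnpj rfl

theorem alt_toList (cnpj : String) : (consertar_str_cnpj_alt cnpj).toList =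
    List.replicate (14 - (pvStrip cnpj).toList.length) '0'
      ++ (pvStrip cnpj).toList.take 14 := by
  rw [consertar_str_cnpj_alt]
  split
  · next h =>
    rw [PySem.Str.len_eq] at h
    have hlen : 14 ≤ (pvStrip cnpj).toList.length := by exact_mod_cast h
    rw [show 14 - (pvStrip cnpj).toList.length = 0 by omega, List.replicate_zero,
      List.nil_append, PySem.Str.toList_slice, PySem.Chars.slice_eq_listSlice,
      PySem.List.slice_to _ (by norm_num)]
    rfl
  · next h =>
    rw [PySem.Str.len_eq] at h
    have hlen : (pvStrip cnpj).toList.length < 14 := by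
      by_contra hc
      exact h (by exact_mod_cast Nat.le_of_not_lt hc)
    rw [String.toList_ofList, List.take_of_length_le (by omega)]


-- ===== VERDICT (by name: the statement is the Claim_ definition above) =====
theorem consertar_str_cnpj_spec : Claim_equal_consertar_str_cnpj := by
  intro cnpj _
  unfold Spec_consertar_str_cnpj
  exact String.toList_inj.mp ((A_toList cnpj).trans (alt_toList cnpj).symm)
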